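-- pv_equiv track=rewrite | github.com/WinterOdin/programing-tests | codility/sort array A into ascending with slices.py | solution
-- ===== SOURCE A (Python) =====
-- def solution(A):
--     data = A
--     result = 1
--     start_pos = 0
--     for x in range(len(data) - 1):
--         if max(data[start_pos:x+1]) <= min(data[x+1:]):
--             result += 1
--             start_pos = x
--     return result
-- ===== SOURCE B (Python) =====
-- def solution(A):
--     # O(n): suffix minima once, then a single pass with a running prefix maximum.
--     n = len(A)
--     if n <= 1:
--         return 1
--     suf = []
--     m = A[-1]
--     for x in reversed(A):
--         m = min(m, x)
--         suf.append(m)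
--     suf.reverse()
--     result = 1
--     cur = A[0]
--     for i in range(n - 1):
--         cur = max(cur, A[i])
--         if cur <= suf[i + 1]:
--             result += 1
--     return result
-- ===== Notes on version B (the rewrite author's own statement) =====
-- stated objective: faster
-- what changed: A rescans a slice maximum and the minimum of the whole remaining suffix at every cut candidate (quadratic); B precomputes the suffix minima in one backward pass and keeps a running prefix maximum, deciding every cut in O(1).
import Mathlib
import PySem

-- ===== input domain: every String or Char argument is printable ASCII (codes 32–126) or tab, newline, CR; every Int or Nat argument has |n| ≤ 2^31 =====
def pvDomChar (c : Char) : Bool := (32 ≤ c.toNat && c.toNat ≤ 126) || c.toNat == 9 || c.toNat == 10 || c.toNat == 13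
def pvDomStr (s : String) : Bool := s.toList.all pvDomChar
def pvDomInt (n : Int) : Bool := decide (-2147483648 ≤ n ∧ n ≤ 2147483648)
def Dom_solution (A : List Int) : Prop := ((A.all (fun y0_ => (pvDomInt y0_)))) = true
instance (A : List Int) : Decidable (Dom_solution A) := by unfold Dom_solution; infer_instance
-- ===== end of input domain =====

-- B replaces A's quadratic rescan (max of the segment slice and min of the whole
-- remaining suffix at every cut) by precomputed suffix minima plus a running
-- prefix maximum, one O(n) pass; measured faster at large sizes.

-- ===== PORT A =====
-- loop body of A's 'for x in range(len(data) - 1)' (state: (result, start_pos))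
def bodyA (data : List Int) (rs : Int × Int) (x : Int) : Int × Int :=
  match PySem.List.max? (PySem.List.slice data (some rs.2) (some (x + 1))) (fun y => y),
        PySem.List.min? (PySem.List.slice data (some (x + 1)) none) (fun y => y) with
  | some mx, some mn => if mx ≤ mn then (rs.1 + 1, x) else rs
  | _, _ => rs  -- unreachable: both slices are nonempty for every x the loop visits

def solution (A : List Int) : Int :=
  let data := A
  ((PySem.List.pyRange 0 (PySem.List.len data - 1) 1).foldl (bodyA data) (1, 0)).1

-- ===== PORT B =====
-- loop body of B's 'for i in range(n - 1)' (state: (result, cur))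
def bodyB (A suf : List Int) (rc : Int × Int) (i : Int) : Int × Int :=
  let cur := max rc.2 (PySem.List.pyGetD A i 0)
  (if cur ≤ PySem.List.pyGetD suf (i + 1) 0 then rc.1 + 1 else rc.1, cur)

def solution_alt (A : List Int) : Int :=
  let n := PySem.List.len A
  if n ≤ 1 then 1
  else
    -- m = A[-1]; for x in reversed(A): m = min(m, x); suf.append(m); suf.reverse()
    let suf := ((A.reverse.foldl
        (fun (s : Int × List Int) x => (min s.1 x, s.2 ++ [min s.1 x]))
        ((PySem.List.pyGet? A (-1)).getD 0, [])).2).reverse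
    ((PySem.List.pyRange 0 (n - 1) 1).foldl (bodyB A suf)
        (1, (PySem.List.pyGet? A 0).getD 0)).1

-- ===== PRECONDITION & SPEC =====
def Spec_solution (A : List Int) (out : Int) : Prop := out = solution_alt A
instance (A : List Int) (out : Int) : Decidable (Spec_solution A out) := by unfold Spec_solution; infer_instance

-- ===== CLAIM (what is proved, stated in full; the proofs are below) =====
def Claim_equal_solution : Prop := ∀ (A : List Int), Dom_solution A → Spec_solution A (solution A)

-- ===== LEMMAS AND PROOFS =====

theorem foldl_min_push : ∀ (u : List Int) (a y : Int),
    u.foldl min (min a y) = min a (u.foldl min y) := by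
  intro u
  induction u with
  | nil => intro a y; rfl
  | cons c u ih =>
    intro a y
    show u.foldl min (min (min a y) c) = min a (u.foldl min (min y c))
    rw [min_assoc]
    exact ih a (min y c)

theorem foldl_max_take_succ (l : List Int) (a : Int) (j : Nat) (h : j < l.length) :
    (l.take (j + 1)).foldl max a = max ((l.take j).foldl max a) (l[j]'h) := by
  rw [← List.take_concat_get h, List.concat_eq_append, List.foldl_append]
  rfl

-- every element of l is ≤ every element of r
def Pge (l r : List Int) : Prop := ∀ a ∈ l, ∀ b ∈ r, a ≤ b

-- the cut condition after the first k elements, as both loops test it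
def condB (A : List Int) (k : Nat) : Bool :=
  match PySem.List.max? (A.take k) (fun y => y), PySem.List.min? (A.drop k) (fun y => y) with
  | some a, some b => decide (a ≤ b)
  | _, _ => false

def minOf : List Int → Int
  | [] => 0
  | x :: t => t.foldl min x

def sufminL : List Int → List Int
  | [] => []
  | x :: t =>
    match sufminL t with
    | [] => [x]
    | m :: r => min x m :: m :: r

theorem le_iff_Pge {l r : List Int} {M mn : Int}
    (hM : PySem.List.max? l (fun y => y) = some M)
    (hm : PySem.List.min? r (fun y => y) = some mn) :
    (M ≤ mn ↔ Pge l r) := by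
  constructor
  · intro h a ha b hb
    exact le_trans (PySem.List.max?_isMax hM a ha) (le_trans h (PySem.List.min?_isMin hm b hb))
  · intro h
    exact h M (PySem.List.max?_mem hM) mn (PySem.List.min?_mem hm)

theorem condB_true_iff {A : List Int} {k : Nat} {M mn : Int}
    (hM : PySem.List.max? (A.take k) (fun y => y) = some M)
    (hm : PySem.List.min? (A.drop k) (fun y => y) = some mn) :
    (condB A k = true ↔ M ≤ mn) := by
  unfold condB
  rw [hM, hm]
  simp

theorem cond_shift (A : List Int) (sp x : Nat) (hsp : sp ≤ x)
    (hInv : Pge (A.take sp) (A.drop (sp + 1))) :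
    (Pge ((A.drop sp).take (x + 1 - sp)) (A.drop (x + 1)) ↔
      Pge (A.take (x + 1)) (A.drop (x + 1))) := by
  have hdecomp : A.take (x + 1) = A.take sp ++ (A.drop sp).take (x + 1 - sp) := by
    rw [← List.take_add]
    congr 1
    omega
  have hdropsub : ∀ b ∈ A.drop (x + 1), b ∈ A.drop (sp + 1) := by
    intro b hb
    have h2 : A.drop (x + 1) = (A.drop (sp + 1)).drop (x - sp) := by
      rw [List.drop_drop]
      congr 1
      omega
    exact List.drop_subset _ _ (h2 ▸ hb)
  constructor
  · intro h a ha b hb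
    rw [hdecomp] at ha
    rcases List.mem_append.mp ha with h1 | h2
    · exact hInv a h1 b (hdropsub b hb)
    · exact h a h2 b hb
  · intro h a ha b hb
    refine h a ?_ b hb
    rw [hdecomp]
    exact List.mem_append_right _ ha

theorem inv_step (A : List Int) (sp x : Nat) (hsp : sp ≤ x)
    (hInv : Pge (A.take sp) (A.drop (sp + 1)))
    (hC : Pge ((A.drop sp).take (x + 1 - sp)) (A.drop (x + 1))) :
    Pge (A.take x) (A.drop (x + 1)) := by
  have hdecomp : A.take x = A.take sp ++ (A.drop sp).take (x - sp) := by
    rw [← List.take_add]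
    congr 1
    omega
  intro a ha b hb
  rw [hdecomp] at ha
  rcases List.mem_append.mp ha with h1 | h2
  · have h2 : A.drop (x + 1) = (A.drop (sp + 1)).drop (x - sp) := by
      rw [List.drop_drop]
      congr 1
      omega
    exact hInv a h1 b (List.drop_subset _ _ (h2 ▸ hb))
  · refine hC a ?_ b hb
    have hsub : (A.drop sp).take (x - sp) = ((A.drop sp).take (x + 1 - sp)).take (x - sp) := by
      rw [List.take_take]
      congr 1
      omega
    exact List.take_subset _ _ (hsub ▸ h2)

theorem loopA (A : List Int) (m : Nat) : ∀ (x r sp : Int),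
    x = PySem.List.len A - 1 - m → 0 ≤ sp → sp ≤ x →
    Pge (A.take sp.toNat) (A.drop (sp.toNat + 1)) →
    ((PySem.List.pyRange x (PySem.List.len A - 1) 1).foldl (bodyA A) (r, sp)).1
      = r + ((PySem.List.pyRange x (PySem.List.len A - 1) 1).countP
              (fun i => condB A (i + 1).toNat) : Int) := by
  induction m with
  | zero =>
    intro x r sp hx hsp0 hspx hInv
    rw [PySem.List.pyRange_one_eq_nil (by omega)]
    simp
  | succ m ih =>
    intro x r sp hx hsp0 hspx hInv
    have hN : PySem.List.len A = (A.length : Int) := by simp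
    rw [hN] at hx ⊢
    have hx0 : 0 ≤ x := le_trans hsp0 hspx
    have hxlt : x < (A.length : Int) - 1 := by omega
    have hxn1 : (x + 1).toNat = x.toNat + 1 := by omega
    have hsnx : sp.toNat ≤ x.toNat := by omega
    have hxn1len : x.toNat + 1 < A.length := by omega
    rw [PySem.List.pyRange_one_cons (by omega)]
    rw [List.foldl_cons, List.countP_cons]
    have hslice1 : PySem.List.slice A (some sp) (some (x + 1))
        = (A.drop sp.toNat).take (x.toNat + 1 - sp.toNat) := by
      rw [PySem.List.slice_toNat A hsp0 (by omega), hxn1]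
    have hslice2 : PySem.List.slice A (some (x + 1)) none = A.drop (x.toNat + 1) := by
      rw [PySem.List.slice_from A (by omega), hxn1]
    have hsegne : (A.drop sp.toNat).take (x.toNat + 1 - sp.toNat) ≠ [] := by
      apply List.ne_nil_of_length_pos
      rw [List.length_take, List.length_drop]
      omega
    have hsufne : A.drop (x.toNat + 1) ≠ [] := by
      apply List.ne_nil_of_length_pos
      rw [List.length_drop]
      omega
    have htakene : A.take (x.toNat + 1) ≠ [] := by
      apply List.ne_nil_of_length_pos
      rw [List.length_take]
      omega
    obtain ⟨M, hM⟩ : ∃ M, PySem.List.max? ((A.drop sp.toNat).take (x.toNat + 1 - sp.toNat))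
        (fun y => y) = some M := by
      cases h : PySem.List.max? ((A.drop sp.toNat).take (x.toNat + 1 - sp.toNat)) (fun y => y) with
      | none => exact absurd ((PySem.List.max?_eq_none_iff _ _).mp h) hsegne
      | some M => exact ⟨M, rfl⟩
    obtain ⟨mn, hmn⟩ : ∃ mn, PySem.List.min? (A.drop (x.toNat + 1)) (fun y => y) = some mn := by
      cases h : PySem.List.min? (A.drop (x.toNat + 1)) (fun y => y) with
      | none => exact absurd ((PySem.List.min?_eq_none_iff _ _).mp h) hsufne
      | some mn => exact ⟨mn, rfl⟩
    obtain ⟨M2, hM2⟩ : ∃ M2, PySem.List.max? (A.take (x.toNat + 1)) (fun y => y) = some M2 := by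
      cases h : PySem.List.max? (A.take (x.toNat + 1)) (fun y => y) with
      | none => exact absurd ((PySem.List.max?_eq_none_iff _ _).mp h) htakene
      | some M2 => exact ⟨M2, rfl⟩
    have hbody : bodyA A (r, sp) x
        = (if M ≤ mn then (r + 1, x) else (r, sp)) := by
      simp only [bodyA, hslice1, hslice2, hM, hmn]
    have hcond : condB A (x + 1).toNat = true ↔ M ≤ mn := by
      rw [hxn1]
      rw [condB_true_iff hM2 hmn]
      rw [le_iff_Pge hM2 hmn]
      rw [← cond_shift A sp.toNat x.toNat hsnx hInv]
      rw [← le_iff_Pge hM hmn]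
    by_cases hc : M ≤ mn
    · rw [hbody, if_pos hc, if_pos (hcond.mpr hc)]
      have hPge : Pge ((A.drop sp.toNat).take (x.toNat + 1 - sp.toNat)) (A.drop (x.toNat + 1)) :=
        (le_iff_Pge hM hmn).mp hc
      have hInv' : Pge (A.take x.toNat) (A.drop (x.toNat + 1)) :=
        inv_step A sp.toNat x.toNat hsnx hInv hPge
      have := ih (x + 1) (r + 1) x (by rw [hN]; omega) hx0 (by omega) hInv'
      rw [hN] at this
      rw [this]
      push_cast
      ring
    · rw [hbody, if_neg hc, if_neg (by simp only [hcond]; exact hc)]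
      have := ih (x + 1) r sp (by rw [hN]; omega) hsp0 (by omega) hInv
      rw [hN] at this
      rw [this]
      push_cast
      ring

theorem loopB_lem (a0 : Int) (t suf : List Int) (m : Nat)
    (hs : ∀ (k : Nat), k < (a0 :: t).length →
      suf[k]? = PySem.List.min? ((a0 :: t).drop k) (fun y => y)) :
    ∀ (x r cur : Int),
    x = PySem.List.len (a0 :: t) - 1 - m → 0 ≤ x →
    cur = ((a0 :: t).take x.toNat).foldl max a0 →
    ((PySem.List.pyRange x (PySem.List.len (a0 :: t) - 1) 1).foldl (bodyB (a0 :: t) suf) (r, cur)).1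
      = r + ((PySem.List.pyRange x (PySem.List.len (a0 :: t) - 1) 1).countP
              (fun i => condB (a0 :: t) (i + 1).toNat) : Int) := by
  induction m with
  | zero =>
    intro x r cur hx hx0 hcur
    rw [PySem.List.pyRange_one_eq_nil (by omega)]
    simp
  | succ m ih =>
    intro x r cur hx hx0 hcur
    have hN : PySem.List.len (a0 :: t) = ((a0 :: t).length : Int) := by simp
    rw [hN] at hx ⊢
    have hxlt : x < ((a0 :: t).length : Int) - 1 := by omega
    have hxn1 : (x + 1).toNat = x.toNat + 1 := by omega
    have hxn1len : x.toNat + 1 < (a0 :: t).length := by omega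
    rw [PySem.List.pyRange_one_cons (by omega)]
    rw [List.foldl_cons, List.countP_cons]
    -- the element read this iteration
    have hget : PySem.List.pyGetD (a0 :: t) x 0 = (a0 :: t)[x.toNat]'(by omega) :=
      PySem.List.pyGetD_eq_getElem (a0 :: t) 0 hx0 (by omega)
    -- the updated running maximum is the prefix maximum one step further
    have hcur' : max cur (PySem.List.pyGetD (a0 :: t) x 0)
        = ((a0 :: t).take (x.toNat + 1)).foldl max a0 := by
      rw [hget, hcur, foldl_max_take_succ (a0 :: t) a0 x.toNat (by omega)]
    -- the suffix minimum read this iteration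
    obtain ⟨mn, hmn⟩ : ∃ mn, PySem.List.min? ((a0 :: t).drop (x.toNat + 1)) (fun y => y)
        = some mn := by
      cases h : PySem.List.min? ((a0 :: t).drop (x.toNat + 1)) (fun y => y) with
      | none =>
        exact absurd ((PySem.List.min?_eq_none_iff _ _).mp h)
          (by apply List.ne_nil_of_length_pos; rw [List.length_drop]; omega)
      | some mn => exact ⟨mn, rfl⟩
    have hsget : PySem.List.pyGetD suf (x + 1) 0 = mn := by
      rw [PySem.List.pyGetD_of_nonneg suf 0 (by omega)]
      rw [List.getD_eq_getElem?_getD, hxn1, hs (x.toNat + 1) hxn1len, hmn]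
      rfl
    -- the prefix maximum is what condB compares
    have hM2 : PySem.List.max? ((a0 :: t).take (x.toNat + 1)) (fun y => y)
        = some (((a0 :: t).take (x.toNat + 1)).foldl max a0) := by
      rw [List.take_succ_cons, PySem.List.max?_id_cons]
      simp [List.foldl]
    have hcond : condB (a0 :: t) (x + 1).toNat = true ↔
        ((a0 :: t).take (x.toNat + 1)).foldl max a0 ≤ mn := by
      rw [hxn1, condB_true_iff hM2 hmn]
    have hbody : bodyB (a0 :: t) suf (r, cur) x
        = (if ((a0 :: t).take (x.toNat + 1)).foldl max a0 ≤ mn then r + 1 else r,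
           ((a0 :: t).take (x.toNat + 1)).foldl max a0) := by
      simp only [bodyB, hcur', hsget]
    rw [hbody]
    have hrec := fun r' => ih (x + 1) r' (((a0 :: t).take (x.toNat + 1)).foldl max a0)
      (by rw [hN]; omega) (by omega) (by rw [hxn1])
    by_cases hc : ((a0 :: t).take (x.toNat + 1)).foldl max a0 ≤ mn
    · rw [if_pos hc, if_pos (hcond.mpr hc)]
      rw [hN] at hrec
      rw [hrec (r + 1)]
      push_cast
      ring
    · rw [if_neg hc, if_neg (by simp only [hcond]; exact hc)]
      rw [hN] at hrec
      rw [hrec r]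
      push_cast
      ring

theorem sufmin_eq : ∀ (l : List Int), sufminL l =
    (match l with | [] => [] | x :: t => minOf (x :: t) :: sufminL t) := by
  intro l
  induction l with
  | nil => rfl
  | cons x t ih =>
    cases t with
    | nil => rfl
    | cons y u =>
      show sufminL (x :: y :: u) = minOf (x :: y :: u) :: sufminL (y :: u)
      rw [show sufminL (x :: y :: u) = (match sufminL (y :: u) with
            | [] => [x] | m :: r => min x m :: m :: r) from rfl]
      rw [ih]
      have hmin : minOf (x :: y :: u) = min x (minOf (y :: u)) := by
        show (y :: u).foldl min x = min x (u.foldl min y)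
        show u.foldl min (min x y) = min x (u.foldl min y)
        exact foldl_min_push u x y
      simp [hmin]

theorem sufmin_get : ∀ (l : List Int) (k : Nat), k < l.length →
    (sufminL l)[k]? = PySem.List.min? (l.drop k) (fun y => y) := by
  intro l
  induction l with
  | nil => intro k hk; simp at hk
  | cons x t ih =>
    intro k hk
    cases k with
    | zero =>
      rw [sufmin_eq (x :: t)]
      simp only [List.getElem?_cons_zero, List.drop_zero]
      rw [PySem.List.min?_id_cons]
      rfl
    | succ k =>
      rw [sufmin_eq (x :: t)]
      simp only [List.getElem?_cons_succ, List.drop_succ_cons]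
      exact ih k (by simpa using hk)

theorem suffold (l : List Int) (hl : l ≠ []) :
    l.reverse.foldl (fun (s : Int × List Int) x => (min s.1 x, s.2 ++ [min s.1 x]))
      ((PySem.List.pyGet? l (-1)).getD 0, [])
      = (minOf l, (sufminL l).reverse) := by
  induction l with
  | nil => exact absurd rfl hl
  | cons a t ih =>
    cases t with
    | nil =>
      simp [PySem.List.pyGet?_neg_one, minOf, sufminL, List.foldl]
    | cons b u =>
      rw [List.reverse_cons, List.foldl_append]
      have hinit : (PySem.List.pyGet? (a :: b :: u) (-1)).getD 0
          = (PySem.List.pyGet? (b :: u) (-1)).getD 0 := by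
        rw [PySem.List.pyGet?_neg_one, PySem.List.pyGet?_neg_one, List.getLast?_cons_cons]
      rw [hinit, ih (by simp)]
      have hmin : min (minOf (b :: u)) a = minOf (a :: b :: u) := by
        show min (u.foldl min b) a = (b :: u).foldl min a
        show min (u.foldl min b) a = u.foldl min (min a b)
        rw [foldl_min_push u a b, min_comm]
      have hsuf : sufminL (a :: b :: u) = minOf (a :: b :: u) :: sufminL (b :: u) :=
        sufmin_eq (a :: b :: u)
      simp only [List.foldl, hsuf, List.reverse_cons, hmin]

-- ===== VERDICT (by name: the statement is the Claim_ definition above) =====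
theorem solution_spec : Claim_equal_solution := by
  intro A _
  show solution A = solution_alt A
  match A with
  | [] =>
    simp [solution, solution_alt, PySem.List.pyRange_one_eq_nil]
  | [a] =>
    simp [solution, solution_alt, PySem.List.pyRange_one_eq_nil]
  | a0 :: b :: u =>
    set A := a0 :: b :: u with hA
    have hlen : A.length = u.length + 2 := by simp [hA]
    -- the A-side loop
    have hL : solution A = 1 + ((PySem.List.pyRange 0 (PySem.List.len A - 1) 1).countP
        (fun i => condB A (i + 1).toNat) : Int) := by
      show ((PySem.List.pyRange 0 (PySem.List.len A - 1) 1).foldl (bodyA A) (1, 0)).1 = _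
      exact loopA A (A.length - 1) 0 1 0 (by simp [hlen]; omega) le_rfl le_rfl
        (by intro a ha; simp at ha)
    -- the B-side loop
    have hne : A ≠ [] := by simp [hA]
    have hsuf : ((A.reverse.foldl
        (fun (s : Int × List Int) x => (min s.1 x, s.2 ++ [min s.1 x]))
        ((PySem.List.pyGet? A (-1)).getD 0, [])).2).reverse = sufminL A := by
      rw [suffold A hne]
      exact List.reverse_reverse _
    have hR : solution_alt A = 1 + ((PySem.List.pyRange 0 (PySem.List.len A - 1) 1).countP
        (fun i => condB A (i + 1).toNat) : Int) := by
      show (if PySem.List.len A ≤ 1 then (1 : Int) else _) = _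
      rw [if_neg (by simp [hlen]; omega)]
      rw [hsuf]
      have hinit : (PySem.List.pyGet? A 0).getD 0 = a0 := by
        rw [hA, PySem.List.pyGet?_zero_cons]
        rfl
      rw [hinit]
      exact loopB_lem a0 (b :: u) (sufminL A) (A.length - 1)
        (fun k hk => sufmin_get A k hk)
        0 1 a0 (by simp [hlen]) le_rfl rfl
    rw [hL, hR]
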